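-- pv_equiv track=rewrite | github.com/tutorai-no/tutor-service | learning/services/study_plan_generator.py | _distribute_topics_across_weeks
-- ===== SOURCE A (Python) =====
-- def _distribute_topics_across_weeks(
--     topics: list[str], weeks: int
-- ) -> dict[int, list[str]]:
--     """Distribute topics evenly across weeks."""
--     distribution = {}
--     topics_per_week = max(1, len(topics) // weeks)
--
--     for week in range(1, weeks + 1):
--         start_idx = (week - 1) * topics_per_week
--         end_idx = start_idx + topics_per_week
--
--         if week == weeks:  # Last week gets remaining topics
--             week_topics = topics[start_idx:]
--         else:
--             week_topics = topics[start_idx:end_idx]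
--
--         distribution[week] = week_topics
--
--     return distribution
-- ===== SOURCE B (Python) =====
-- def _distribute_topics_across_weeks(
--     topics: list[str], weeks: int
-- ) -> dict[int, list[str]]:
--     """Distribute topics evenly across weeks."""
--     topics_per_week = max(1, len(topics) // weeks)
--
--     week, remaining, pairs = 1, topics, []
--     while week < weeks:
--         pairs.append((week, remaining[:topics_per_week]))
--         remaining = remaining[topics_per_week:]
--         week += 1
--     if week == weeks:  # last week takes everything still unassigned
--         pairs.append((week, remaining))
--     return dict(pairs)
-- ===== Notes on version B (the rewrite author's own statement) =====
-- stated objective: alternative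
-- what changed: Replaces the week-indexed loop that slices topics[start:end] by absolute index arithmetic into a dict with a loop that peels topics_per_week topics off the front of a shrinking 'remaining' list, appends the last week's remaining topics after the loop, and builds the dict once from the collected pairs.
import Mathlib
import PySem

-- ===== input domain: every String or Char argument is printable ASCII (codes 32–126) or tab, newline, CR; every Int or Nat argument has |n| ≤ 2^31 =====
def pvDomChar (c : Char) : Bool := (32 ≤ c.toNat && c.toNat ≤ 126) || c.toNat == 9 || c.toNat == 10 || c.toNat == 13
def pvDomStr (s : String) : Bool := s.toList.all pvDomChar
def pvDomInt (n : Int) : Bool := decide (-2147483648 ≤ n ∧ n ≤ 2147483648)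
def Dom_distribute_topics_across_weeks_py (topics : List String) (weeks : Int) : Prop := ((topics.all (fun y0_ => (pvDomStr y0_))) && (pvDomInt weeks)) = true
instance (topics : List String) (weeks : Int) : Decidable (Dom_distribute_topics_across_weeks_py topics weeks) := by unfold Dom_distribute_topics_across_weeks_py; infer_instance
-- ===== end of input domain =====

-- B replaces A's week-indexed slicing loop with a loop that peels fixed-size chunks off the front of
-- the remaining topics list and builds the dict once at the end (alternative decomposition); proved equal for weeks ≠ 0.


-- ===== PORT A =====
def distribute_topics_across_weeks_py (topics : List String) (weeks : Int) : List (Int × List String) :=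
  let topics_per_week : Int := max 1 (PySem.Int.floordiv topics.length weeks)
  ((PySem.List.pyRange 1 (weeks + 1) 1).foldl (fun distribution week =>
      let start_idx := (week - 1) * topics_per_week
      let end_idx := start_idx + topics_per_week
      let week_topics :=
        if week == weeks then PySem.List.slice topics (some start_idx) none
        else PySem.List.slice topics (some start_idx) (some end_idx)
      distribution.insert week week_topics)
    PySem.Dict.empty).items

-- ===== PORT B =====
def pvLoop (weeks topics_per_week : Int) (week : Int) (remaining : List String)
    (pairs : List (Int × List String)) : Int × List String × List (Int × List String) :=
  if _h : week < weeks then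
    pvLoop weeks topics_per_week (week + 1)
      (PySem.List.slice remaining (some topics_per_week) none)
      (pairs ++ [(week, PySem.List.slice remaining none (some topics_per_week))])
  else (week, remaining, pairs)
termination_by (weeks - week).toNat
decreasing_by simp at *; omega

def distribute_topics_across_weeks_py_alt (topics : List String) (weeks : Int) : List (Int × List String) :=
  let topics_per_week : Int := max 1 (PySem.Int.floordiv topics.length weeks)
  let s := pvLoop weeks topics_per_week 1 topics []
  let pairs := if s.1 == weeks then s.2.2 ++ [(s.1, s.2.1)] else s.2.2
  (PySem.Dict.ofList pairs).items

-- ===== PRECONDITION & SPEC =====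
-- Pre_ excludes exactly weeks = 0, where A raises ZeroDivisionError on len(topics) // weeks.
def Pre_distribute_topics_across_weeks_py (topics : List String) (weeks : Int) : Prop := weeks ≠ 0
instance (topics : List String) (weeks : Int) : Decidable (Pre_distribute_topics_across_weeks_py topics weeks) := by unfold Pre_distribute_topics_across_weeks_py; infer_instance
def pvWitness_distribute_topics_across_weeks_py : List String × Int := (["a", "b", "c"], 2)

def Spec_distribute_topics_across_weeks_py (topics : List String) (weeks : Int) (out : List (Int × List String)) : Prop := out = distribute_topics_across_weeks_py_alt topics weeks
instance (topics : List String) (weeks : Int) (out : List (Int × List String)) : Decidable (Spec_distribute_topics_across_weeks_py topics weeks out) := by unfold Spec_distribute_topics_across_weeks_py; infer_instance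

-- ===== CLAIM (what is proved, stated in full; the proofs are below) =====
def Claim_equal_distribute_topics_across_weeks_py : Prop := ∀ (topics : List String) (weeks : Int), Dom_distribute_topics_across_weeks_py topics weeks → Pre_distribute_topics_across_weeks_py topics weeks → Spec_distribute_topics_across_weeks_py topics weeks (distribute_topics_across_weeks_py topics weeks)

-- ===== LEMMAS AND PROOFS =====

-- the per-week bucket A computes, as a named function
def pvBucket (topics : List String) (weeks tpw w : Int) : List String :=
  if w == weeks then PySem.List.slice topics (some ((w - 1) * tpw)) none
  else PySem.List.slice topics (some ((w - 1) * tpw)) (some ((w - 1) * tpw + tpw))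

theorem pvA_items (topics : List String) (weeks : Int) :
    distribute_topics_across_weeks_py topics weeks =
      (PySem.List.pyRange 1 (weeks + 1) 1).map
        (fun w => (w, pvBucket topics weeks (max 1 (PySem.Int.floordiv topics.length weeks)) w)) := by
  unfold distribute_topics_across_weeks_py
  have h := PySem.Dict.items_foldl_insert_fresh
    (PySem.List.pyRange 1 (weeks + 1) 1) (fun w => w)
    (fun w => pvBucket topics weeks (max 1 (PySem.Int.floordiv topics.length weeks)) w)
    PySem.Dict.empty
    (by intro a _; exact PySem.Dict.contains_empty a)
    (by simpa using PySem.List.nodup_pyRange_one 1 (weeks + 1))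
  simpa [pvBucket] using h

theorem pvLoop_eq (topics : List String) (weeks tpw : Int) (htpw : 1 ≤ tpw) :
    ∀ (n : ℕ) (week : Int) (acc : List (Int × List String)),
      1 ≤ week → week ≤ weeks → (weeks - week).toNat ≤ n →
      pvLoop weeks tpw week (topics.drop ((week - 1) * tpw).toNat) acc =
        (weeks, topics.drop ((weeks - 1) * tpw).toNat,
          acc ++ (PySem.List.pyRange week weeks 1).map
            (fun w => (w, PySem.List.slice topics (some ((w - 1) * tpw)) (some ((w - 1) * tpw + tpw))))) := by
  intro n
  induction n with
  | zero =>
    intro week acc h1 hle hn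
    have hw : week = weeks := by omega
    rw [pvLoop.eq_def, dif_neg (by omega), PySem.List.pyRange_one_eq_nil (by omega)]
    simp [hw]
  | succ n ih =>
    intro week acc h1 hle hn
    have hs : (0 : Int) ≤ (week - 1) * tpw := mul_nonneg (by omega) (by omega)
    by_cases hlt : week < weeks
    · rw [pvLoop.eq_def, dif_pos hlt,
        PySem.List.slice_from _ (by omega), List.drop_drop]
      have harg : ((week - 1) * tpw).toNat + tpw.toNat = ((week + 1 - 1) * tpw).toNat := by
        have : (week + 1 - 1) * tpw = (week - 1) * tpw + tpw := by ring
        omega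
      rw [harg, ih (week + 1) _ (by omega) (by omega) (by omega),
        PySem.List.pyRange_one_cons hlt]
      simp only [List.map_cons, List.append_assoc, List.cons_append,
        List.nil_append]
      rw [PySem.List.slice_toNat _ hs (by omega), PySem.List.slice_to _ (by omega)]
      have hnat : ((week - 1) * tpw + tpw).toNat - ((week - 1) * tpw).toNat = tpw.toNat := by
        omega
      rw [hnat]
    · have hw : week = weeks := by omega
      rw [pvLoop.eq_def, dif_neg (by omega), PySem.List.pyRange_one_eq_nil (by omega)]
      simp [hw]

theorem pvOfList_items {l : List (Int × List String)} (h : (l.map Prod.fst).Nodup) :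
    (PySem.Dict.ofList l).items = l := by
  have h2 := PySem.Dict.items_foldl_insert_fresh l Prod.fst Prod.snd PySem.Dict.empty
    (by intro a _; exact PySem.Dict.contains_empty a.1) h
  simpa [PySem.Dict.ofList, PySem.Dict.update] using h2

-- ===== VERDICT (by name: the statement is the Claim_ definition above) =====
theorem distribute_topics_across_weeks_py_spec : Claim_equal_distribute_topics_across_weeks_py := by
  intro topics weeks _ hpre
  unfold Spec_distribute_topics_across_weeks_py distribute_topics_across_weeks_py_alt
  dsimp only
  rw [pvA_items]
  set tpw : Int := max 1 (PySem.Int.floordiv topics.length weeks) with htpw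
  have h1 : 1 ≤ tpw := le_max_left _ _
  by_cases hw : 1 ≤ weeks
  · have hloop := pvLoop_eq topics weeks tpw h1 (weeks - 1).toNat 1 [] (by omega) hw (by omega)
    simp only [show ((1 : Int) - 1) * tpw = 0 by ring, Int.toNat_zero, List.drop_zero] at hloop
    rw [hloop]
    simp only [beq_self_eq_true, if_pos, List.nil_append]
    rw [pvOfList_items]
    · rw [PySem.List.pyRange_one_succ_right (by omega), List.map_append]
      congr 1
      · refine List.map_congr_left ?_
        intro w hwmem
        rw [PySem.List.mem_pyRange_one] at hwmem
        simp only [pvBucket]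
        rw [if_neg (by simp; omega)]
      · simp only [List.map_cons, List.map_nil, pvBucket]
        rw [if_pos (by simp), PySem.List.slice_from _ (mul_nonneg (by omega) (by omega))]
    · have h2 : (PySem.List.pyRange 1 weeks 1 ++ [weeks]).Nodup := by
        have h3 := PySem.List.nodup_pyRange_one 1 (weeks + 1)
        rwa [PySem.List.pyRange_one_succ_right (by omega : (1 : Int) ≤ weeks)] at h3
      simpa [Function.comp_def] using h2
  · have hneg : weeks < 0 := by
      rcases lt_or_ge weeks 0 with h | h
      · exact h
      · exact absurd (by omega : weeks = 0) hpre
    rw [pvLoop.eq_def, dif_neg (by omega)]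
    rw [PySem.List.pyRange_one_eq_nil (by omega)]
    simp only [List.map_nil]
    rw [if_neg (by simp; omega)]
    rfl
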